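-- pv_equiv track=rewrite | github.com/HugMoraes/SearchEngine | src/insertDocs/utils.py | gerar_combinacoes_generalizadas
-- ===== SOURCE A (Python) =====
-- from itertools import combinations, product
--
-- def gerar_combinacoes_generalizadas(opcionais_comuns: list, grupos_exclusivos: list[list]):
--     """
--     Gera todas as combinações válidas de itens, dadas as regras de exclusividade.
--
--     Args:
--         opcionais_comuns (list): Uma lista de itens que podem ser livremente combinados.
--         grupos_exclusivos (list[list]): Uma lista de listas. Cada lista interna é um grupo
--                                         de itens mutuamente exclusivos (apenas um pode ser
--                                         escolhido por combinação).
--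
--     Returns:
--         list[list]: Uma lista com todas as combinações válidas possíveis. A lista é
--                     ordenada por tamanho e depois alfabeticamente para consistência.
--     """
--
--     # --- Passo 1: Gerar todas as combinações possíveis dos itens comuns ---
--     # Isso inclui a combinação vazia (não escolher nenhum item comum).
--     combos_comuns = []
--     for r in range(len(opcionais_comuns) + 1):
--         for combo in combinations(opcionais_comuns, r):
--             combos_comuns.append(list(combo))
--
--     # --- Passo 2: Gerar todas as escolhas válidas dos grupos exclusivos ---
--     # Para cada grupo, adicionamos 'None' para representar a escolha de "nenhum item deste grupo".
--     opcoes_dos_grupos = []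
--     for grupo in grupos_exclusivos:
--         opcoes_dos_grupos.append(grupo + [None])
--
--     # Usamos itertools.product para obter o produto cartesiano de todas as escolhas possíveis.
--     # Cada resultado do product é uma tupla com uma escolha de cada grupo.
--     # Ex: ('Stemming', 'BERT'), ('Stemming', None), ('Lematização', 'Word2Vec'), etc.
--     combos_exclusivos_raw = product(*opcoes_dos_grupos)
--
--     # Limpamos os resultados, removendo os 'None' para formar as combinações finais.
--     combos_exclusivos = []
--     for combo_tuple in combos_exclusivos_raw:
--         # Filtra os 'None' e cria uma lista limpa
--         clean_combo = [item for item in combo_tuple if item is not None]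
--         combos_exclusivos.append(clean_combo)
--
--     # --- Passo 3: Combinar os resultados e remover duplicatas ---
--     resultados_finais = set()
--     for c_comum in combos_comuns:
--         for c_exclusivo in combos_exclusivos:
--             # Combina a parte comum com a parte exclusiva
--             final_combo = tuple(sorted(c_comum + c_exclusivo))
--             resultados_finais.add(final_combo)
--
--     # Converte o set de tuplas de volta para uma lista de listas
--     lista_de_resultados = [list(combo) for combo in resultados_finais]
--
--     # Ordena a lista final para uma exibição mais clara (primeiro por tamanho, depois alfabeticamente)
--     lista_de_resultados.sort(key=lambda x: (len(x), x))
--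
--     return lista_de_resultados
-- ===== SOURCE B (Python) =====
-- from itertools import product
--
-- def gerar_combinacoes_generalizadas(opcionais_comuns: list, grupos_exclusivos: list[list]):
--     # One uniform cartesian product: each common optional is a binary (item/None)
--     # choice, each exclusive group contributes its items plus None.
--     opcoes = [[item, None] for item in opcionais_comuns]
--     opcoes += [grupo + [None] for grupo in grupos_exclusivos]
--     vistos = set()
--     for escolha in product(*opcoes):
--         vistos.add(tuple(sorted(x for x in escolha if x is not None)))
--     return sorted((list(c) for c in vistos), key=lambda x: (len(x), x))
-- ===== Notes on version B (the rewrite author's own statement) =====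
-- stated objective: simpler
-- what changed: Replaces A's three separate passes (powerset of commons via combinations over every r, product over exclusive groups, then a nested merge loop) with one uniform itertools.product over binary item/None choices for commons plus group+None pools, cleaning and sorting each tuple in a single loop.
import Mathlib
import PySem

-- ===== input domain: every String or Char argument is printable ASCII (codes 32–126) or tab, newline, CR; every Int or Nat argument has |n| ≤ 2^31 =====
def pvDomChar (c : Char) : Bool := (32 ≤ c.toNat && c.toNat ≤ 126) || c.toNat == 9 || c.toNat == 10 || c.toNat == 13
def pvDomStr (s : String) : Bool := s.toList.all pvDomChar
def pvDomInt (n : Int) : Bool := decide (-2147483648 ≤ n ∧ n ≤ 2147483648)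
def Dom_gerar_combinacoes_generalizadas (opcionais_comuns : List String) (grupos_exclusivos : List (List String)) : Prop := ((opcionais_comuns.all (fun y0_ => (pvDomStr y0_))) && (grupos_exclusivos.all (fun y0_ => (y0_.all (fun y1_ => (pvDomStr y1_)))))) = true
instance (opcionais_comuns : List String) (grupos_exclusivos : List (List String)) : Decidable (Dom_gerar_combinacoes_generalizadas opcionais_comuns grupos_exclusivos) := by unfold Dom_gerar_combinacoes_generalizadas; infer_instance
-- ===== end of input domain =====

-- B replaces A's separate powerset/product/merge passes with one cartesian product over
-- item/None choices; objective: simpler, same results.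


-- ===== PORT A =====
-- Shared helper: itertools.product(*pools) in CPython order (last pool varies fastest);
-- ported by hand (no PySem primitive); exact. Both A and B call itertools.product.
def pvProduct {a : Type} (pools : List (List a)) : List (List a) :=
  pools.foldl (fun acc pool => acc.flatMap (fun t => pool.map (fun x => t ++ [x]))) [[]]

def gerar_combinacoes_generalizadas (opcionais_comuns : List String) (grupos_exclusivos : List (List String)) : List (List String) :=
  let combos_comuns : List (List String) :=
    (PySem.List.pyRange 0 ((opcionais_comuns.length : Int) + 1) 1).foldl
      (fun acc r => (PySem.List.combinations opcionais_comuns r.toNat).foldl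
        (fun acc combo => acc ++ [combo]) acc) []
  let opcoes_dos_grupos : List (List (Option String)) :=
    grupos_exclusivos.foldl (fun acc grupo => acc ++ [grupo.map some ++ [none]]) []
  let combos_exclusivos_raw := pvProduct opcoes_dos_grupos
  let combos_exclusivos : List (List String) :=
    combos_exclusivos_raw.foldl (fun acc t => acc ++ [t.filterMap id]) []
  let resultados_finais : PySem.Set (List String) :=
    combos_comuns.foldl (fun s c_comum =>
      combos_exclusivos.foldl (fun s c_exclusivo =>
        s.add (PySem.List.sorted (c_comum ++ c_exclusivo) (fun x => x) false)) s) PySem.Set.empty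
  -- iterating the set: the keyed sort below has an injective key, so the result is order-independent
  let lista_de_resultados : List (List String) :=
    resultados_finais.foldl (fun acc combo => acc ++ [combo]) []
  PySem.List.sorted2 lista_de_resultados (fun x => (x.length : Int)) (fun x => x) false

-- ===== PORT B =====
def gerar_combinacoes_generalizadas_alt (opcionais_comuns : List String) (grupos_exclusivos : List (List String)) : List (List String) :=
  let opcoes : List (List (Option String)) :=
    opcionais_comuns.map (fun item => [some item, none])
      ++ grupos_exclusivos.map (fun grupo => grupo.map some ++ [none])
  let vistos : PySem.Set (List String) :=
    (pvProduct opcoes).foldl (fun s escolha =>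
      s.add (PySem.List.sorted (escolha.filterMap id) (fun x => x) false)) PySem.Set.empty
  PySem.List.sorted2 vistos (fun x => (x.length : Int)) (fun x => x) false

-- ===== PRECONDITION & SPEC =====
def Spec_gerar_combinacoes_generalizadas (opcionais_comuns : List String) (grupos_exclusivos : List (List String)) (out : List (List String)) : Prop := out = gerar_combinacoes_generalizadas_alt opcionais_comuns grupos_exclusivos
instance (opcionais_comuns : List String) (grupos_exclusivos : List (List String)) (out : List (List String)) : Decidable (Spec_gerar_combinacoes_generalizadas opcionais_comuns grupos_exclusivos out) := by unfold Spec_gerar_combinacoes_generalizadas; infer_instance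

-- ===== CLAIM (what is proved, stated in full; the proofs are below) =====
def Claim_equal_gerar_combinacoes_generalizadas : Prop := ∀ (opcionais_comuns : List String) (grupos_exclusivos : List (List String)), Dom_gerar_combinacoes_generalizadas opcionais_comuns grupos_exclusivos → Spec_gerar_combinacoes_generalizadas opcionais_comuns grupos_exclusivos (gerar_combinacoes_generalizadas opcionais_comuns grupos_exclusivos)

-- ===== LEMMAS AND PROOFS =====

theorem pvProduct_shift {a : Type} (pools : List (List a)) (init : List (List a)) :
    pools.foldl (fun acc pool => acc.flatMap (fun t => pool.map (fun x => t ++ [x]))) init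
      = init.flatMap (fun t => (pvProduct pools).map (fun u => t ++ u)) := by
  induction pools generalizing init with
  | nil => simp [pvProduct]
  | cons p ps ih =>
    have hcons : pvProduct (p :: ps) = p.flatMap (fun x => (pvProduct ps).map (fun u => x :: u)) := by
      simp only [pvProduct, List.foldl_cons]
      rw [ih]
      simp [List.flatMap_map, pvProduct]
    rw [List.foldl_cons, ih, hcons, List.flatMap_assoc]
    congr 1; funext t
    simp [List.flatMap_map, List.map_flatMap, List.map_map, Function.comp_def, List.append_assoc]

theorem pvProduct_cons {a : Type} (p : List a) (ps : List (List a)) :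
    pvProduct (p :: ps) = p.flatMap (fun x => (pvProduct ps).map (fun u => x :: u)) := by
  simp only [pvProduct, List.foldl_cons]
  rw [pvProduct_shift ps]
  simp [List.flatMap_map, pvProduct]

theorem mem_pvProduct_append {a : Type} (P Q : List (List a)) (t : List a) :
    t ∈ pvProduct (P ++ Q) ↔ ∃ t1 ∈ pvProduct P, ∃ t2 ∈ pvProduct Q, t = t1 ++ t2 := by
  have h : pvProduct (P ++ Q) = (pvProduct P).flatMap (fun t => (pvProduct Q).map (fun u => t ++ u)) := by
    simp only [pvProduct, List.foldl_append]
    exact pvProduct_shift Q _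
  rw [h]
  simp only [List.mem_flatMap, List.mem_map]
  constructor
  · rintro ⟨t1, h1, t2, h2, rfl⟩; exact ⟨t1, h1, t2, h2, rfl⟩
  · rintro ⟨t1, h1, t2, h2, rfl⟩; exact ⟨t1, h1, t2, h2, rfl⟩

theorem clean_pvProduct_binary (xs : List String) (s : List String) :
    (∃ t ∈ pvProduct (xs.map (fun i => ([some i, none] : List (Option String)))),
        s = t.filterMap id) ↔ s.Sublist xs := by
  induction xs generalizing s with
  | nil =>
    simp [pvProduct, List.sublist_nil]
  | cons i xs ih =>
    rw [List.map_cons, pvProduct_cons]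
    constructor
    · rintro ⟨t, ht, rfl⟩
      simp only [List.mem_flatMap, List.mem_map] at ht
      obtain ⟨x, hx, u, hu, rfl⟩ := ht
      simp only [List.mem_cons, List.not_mem_nil, or_false] at hx
      rcases hx with rfl | rfl
      · simp only [List.filterMap_cons, id]
        exact List.cons_sublist_cons.mpr ((ih _).mp ⟨u, hu, rfl⟩)
      · simp only [List.filterMap_cons, id]
        exact ((ih _).mp ⟨u, hu, rfl⟩).cons i
    · intro hs
      rcases List.sublist_cons_iff.mp hs with h | ⟨r, rfl, hr⟩
      · obtain ⟨t, ht, rfl⟩ := (ih _).mpr h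
        refine ⟨none :: t, ?_, by simp⟩
        simp only [List.mem_flatMap, List.mem_map]
        exact ⟨none, by simp, t, ht, rfl⟩
      · obtain ⟨t, ht, rfl⟩ := (ih _).mpr hr
        refine ⟨some i :: t, ?_, by simp⟩
        simp only [List.mem_flatMap, List.mem_map]
        exact ⟨some i, by simp, t, ht, rfl⟩

theorem sorted2_instSwap {α κ1 κ2 : Type} {i1 i1' : LT κ1} (d1 : @DecidableLT κ1 i1) (d1' : @DecidableLT κ1 i1')
    {i2 i2' : LT κ2} (d2 : @DecidableLT κ2 i2) (d2' : @DecidableLT κ2 i2')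
    (h1 : ∀ a b : κ1, (@LT.lt _ i1 a b) ↔ (@LT.lt _ i1' a b))
    (h2 : ∀ a b : κ2, (@LT.lt _ i2 a b) ↔ (@LT.lt _ i2' a b))
    (l : List α) (k1 : α → κ1) (k2 : α → κ2) :
    @PySem.List.sorted2 α κ1 κ2 i1 d1 i2 d2 l k1 k2 false
      = @PySem.List.sorted2 α κ1 κ2 i1' d1' i2' d2' l k1 k2 false := by
  simp only [PySem.List.sorted2, if_neg (by simp : ¬ (false = true))]
  congr 1
  funext acc x
  congr 1
  funext a b
  rw [(@decide_eq_decide _ _ (d1 (k1 a) (k1 b)) (d1' (k1 a) (k1 b))).mpr (h1 _ _),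
      (@decide_eq_decide _ _ (d1 (k1 b) (k1 a)) (d1' (k1 b) (k1 a))).mpr (h1 _ _),
      (@decide_eq_decide _ _ (d2 (k2 a) (k2 b)) (d2' (k2 a) (k2 b))).mpr (h2 _ _)]
theorem sorted2_eq_sorted_toLex {α κ1 κ2 : Type} [LinearOrder κ1] [LinearOrder κ2]
    (xs : List α) (k1 : α → κ1) (k2 : α → κ2) :
    PySem.List.sorted2 xs k1 k2 false
      = PySem.List.sorted xs (fun x => toLex (k1 x, k2 x)) false := by
  rw [PySem.List.sorted_eq_foldl_insertBy]
  simp only [PySem.List.sorted2, if_neg (by simp : ¬ (false = true))]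
  congr 1
  funext acc x
  congr 1
  funext a b
  rw [(decide_eq_decide (q := (k1 a, k2 a).1 < (k1 b, k2 b).1 ∨ (k1 a, k2 a).1 = (k1 b, k2 b).1 ∧ (k1 a, k2 a).2 < (k1 b, k2 b).2)).mpr Prod.Lex.toLex_lt_toLex]
  rcases lt_trichotomy (k1 a) (k1 b) with h | h | h
  · simp [h]
  · simp [h]
  · simp [h.ne', lt_asymm h]
    intro hle
    exact absurd hle (not_le_of_gt h)
  all_goals infer_instance

theorem sorted2_congr_perm {α κ1 κ2 : Type} [LinearOrder κ1] [LinearOrder κ2]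
    (k1 : α → κ1) (k2 : α → κ2) (hinj : Function.Injective k2)
    {l1 l2 : List α} (hp : l1.Perm l2) :
    PySem.List.sorted2 l1 k1 k2 false = PySem.List.sorted2 l2 k1 k2 false := by
  rw [sorted2_eq_sorted_toLex, sorted2_eq_sorted_toLex]
  exact PySem.List.sorted_eq_sorted_of_perm _ _ _
    (fun a b hab => hinj (congrArg (fun p => (ofLex p).2) hab)) hp

theorem sorted2_congr_perm_LS {l1 l2 : List (List String)} (hp : l1.Perm l2) :
    PySem.List.sorted2 l1 (fun x => (x.length : Int)) (fun x => x) false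
      = PySem.List.sorted2 l2 (fun x => (x.length : Int)) (fun x => x) false := by
  exact (sorted2_instSwap _ _ _ _ (fun a b => Iff.rfl) (fun a b => Iff.rfl) l1 _ _).trans
    (((sorted2_congr_perm (κ1 := Int) (κ2 := List String) (fun x => (x.length : Int)) (fun x => x)
        (fun a b h => h) hp)).trans
      (sorted2_instSwap _ _ _ _ (fun a b => Iff.rfl) (fun a b => Iff.rfl) l2 _ _).symm)

theorem foldl_update_eq_update_flatMap {α β : Type} [BEq α]
    (l : List β) (g : β → List α) (s : PySem.Set α) :
    l.foldl (fun s b => PySem.Set.update s (g b)) s = PySem.Set.update s (l.flatMap g) := by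
  induction l generalizing s with
  | nil => simp [PySem.Set.update_nil]
  | cons b bs ih => simp [ih, PySem.Set.update_append]

theorem mem_combos_comuns (xs : List String) (c : List String) :
    c ∈ (PySem.List.pyRange 0 ((xs.length : Int) + 1) 1).flatMap
        (fun r => PySem.List.combinations xs r.toNat) ↔ c.Sublist xs := by
  simp only [List.mem_flatMap, PySem.List.mem_pyRange_one, PySem.List.mem_combinations_iff]
  constructor
  · rintro ⟨r, _, hs, _⟩; exact hs
  · intro hs
    refine ⟨(c.length : Int), ⟨by positivity, by have := hs.length_le; omega⟩, hs, by simp⟩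

-- ===== VERDICT (by name: the statement is the Claim_ definition above) =====
theorem gerar_combinacoes_generalizadas_spec : Claim_equal_gerar_combinacoes_generalizadas := by
  unfold Claim_equal_gerar_combinacoes_generalizadas Spec_gerar_combinacoes_generalizadas
  intro oc gs _
  unfold gerar_combinacoes_generalizadas gerar_combinacoes_generalizadas_alt
  simp only [PySem.List.foldl_append_singleton_eq_self, PySem.List.foldl_append_eq_flatMap,
    ← List.map_eq_flatMap, List.nil_append, PySem.Set.empty_eq,
    ← PySem.Set.update_map_eq_foldl_add, foldl_update_eq_update_flatMap,
    PySem.Set.update_nil_left]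
  apply sorted2_congr_perm_LS
  rw [List.perm_ext_iff_of_nodup (PySem.Set.nodup_ofList _) (PySem.Set.nodup_ofList _)]
  intro y
  simp only [PySem.Set.mem_ofList]
  constructor
  · intro hy
    rw [List.mem_flatMap] at hy
    obtain ⟨c, hc, hy⟩ := hy
    rw [List.mem_map] at hy
    obtain ⟨e0, he0, rfl⟩ := hy
    rw [List.mem_map] at he0
    obtain ⟨e, he, rfl⟩ := he0
    obtain ⟨t1, ht1, hclean⟩ := (clean_pvProduct_binary oc c).mpr ((mem_combos_comuns oc c).mp hc)
    rw [List.mem_map]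
    refine ⟨t1 ++ e, (mem_pvProduct_append _ _ _).mpr ⟨t1, ht1, e, he, rfl⟩, ?_⟩
    rw [List.filterMap_append, ← hclean]
  · intro hy
    rw [List.mem_map] at hy
    obtain ⟨t, ht, rfl⟩ := hy
    obtain ⟨t1, ht1, t2, ht2, rfl⟩ := (mem_pvProduct_append _ _ _).mp ht
    rw [List.mem_flatMap]
    refine ⟨t1.filterMap id, (mem_combos_comuns oc _).mpr
        ((clean_pvProduct_binary oc _).mp ⟨t1, ht1, rfl⟩), ?_⟩
    rw [List.mem_map]
    refine ⟨t2.filterMap id, List.mem_map.mpr ⟨t2, ht2, rfl⟩, ?_⟩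
    rw [List.filterMap_append]
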